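-- pv_equiv track=rewrite | github.com/qifanyyy/JupyterNotebook | new_algs/Sequence+algorithms/Selection+algorithm/common.py | sepDataAndLabel
-- ===== SOURCE A (Python) =====
-- def sepDataAndLabel(features, labelName):
-- 	data = {}
-- 	label = {}
-- 	for f in features:
-- 		if(f!=labelName):
-- 			data.update({f:features[f]})
-- 		else:
-- 			label.update({f:features[f]})
-- 	return [data,label]
-- ===== SOURCE B (Python) =====
-- def sepDataAndLabel(features, labelName):
--     data = dict(features)
--     label = {}
--     if labelName in data:
--         label[labelName] = data.pop(labelName)
--     return [data, label]
-- ===== Notes on version B (the rewrite author's own statement) =====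
-- stated objective: simpler
-- what changed: Instead of scanning the dict and dispatching every key into one of two accumulators, B clones the whole dict once and then extracts the single label entry with pop, a clone-and-remove decomposition.
import Mathlib
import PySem

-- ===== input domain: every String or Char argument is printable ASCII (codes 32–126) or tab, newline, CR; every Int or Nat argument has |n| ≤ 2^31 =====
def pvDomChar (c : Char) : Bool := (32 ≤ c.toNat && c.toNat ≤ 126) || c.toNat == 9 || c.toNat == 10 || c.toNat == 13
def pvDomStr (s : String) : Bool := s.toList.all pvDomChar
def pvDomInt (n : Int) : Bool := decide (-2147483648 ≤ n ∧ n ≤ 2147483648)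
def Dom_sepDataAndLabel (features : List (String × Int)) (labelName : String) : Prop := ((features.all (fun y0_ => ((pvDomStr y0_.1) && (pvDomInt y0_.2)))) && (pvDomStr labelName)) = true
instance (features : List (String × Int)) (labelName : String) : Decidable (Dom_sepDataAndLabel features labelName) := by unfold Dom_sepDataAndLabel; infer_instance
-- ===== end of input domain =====

-- B replaces A's scan-and-branch classification of each key by a clone-and-remove
-- decomposition (copy the dict, pop the label key); objective: simpler.

-- ===== PORT A =====
-- 'for f in features: … features[f]' — f ranges over the keys of the dict; the lookup
-- features[f] always succeeds (f is a key), so the getD default 0 is never used.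
def sepDataAndLabel (features : List (String × Int)) (labelName : String) : List (List (String × Int)) :=
  let d : PySem.Dict String Int := PySem.Dict.ofList features
  let r := features.foldl
    (fun (acc : PySem.Dict String Int × PySem.Dict String Int) p =>
      if p.1 ≠ labelName then (acc.1.insert p.1 (d.getD p.1 0), acc.2)
      else (acc.1, acc.2.insert p.1 (d.getD p.1 0)))
    (PySem.Dict.empty, PySem.Dict.empty)
  [r.1.items, r.2.items]

-- ===== PORT B =====
-- data = dict(features); if labelName in data: label[labelName] = data.pop(labelName)
-- pop? is some iff the key is contained, so the 'in' guard and the pop are one match;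
-- [(labelName, v)] is the items of the one-entry dict {labelName: v}.
def sepDataAndLabel_alt (features : List (String × Int)) (labelName : String) : List (List (String × Int)) :=
  let data : PySem.Dict String Int := PySem.Dict.ofList features
  match data.pop? labelName with
  | some (v, data') => [data'.items, [(labelName, v)]]
  | none => [data.items, []]

-- ===== PRECONDITION & SPEC =====
-- In Python 'features' is a dict, which cannot carry duplicate keys; Pre_ restricts the
-- association-list encoding to exactly those lists (distinct keys), so it excludes no
-- input the Python function can receive.
def Pre_sepDataAndLabel (features : List (String × Int)) (labelName : String) : Prop :=
  (features.map Prod.fst).Nodup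

instance (features : List (String × Int)) (labelName : String) : Decidable (Pre_sepDataAndLabel features labelName) := by unfold Pre_sepDataAndLabel; infer_instance

def pvWitness_sepDataAndLabel : (List (String × Int)) × String := ([("a", 1), ("b", 2)], "b")

def Spec_sepDataAndLabel (features : List (String × Int)) (labelName : String) (out : List (List (String × Int))) : Prop := out = sepDataAndLabel_alt features labelName
instance (features : List (String × Int)) (labelName : String) (out : List (List (String × Int))) : Decidable (Spec_sepDataAndLabel features labelName out) := by unfold Spec_sepDataAndLabel; infer_instance

-- ===== CLAIM (what is proved, stated in full; the proofs are below) =====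
def Claim_equal_sepDataAndLabel : Prop := ∀ (features : List (String × Int)) (labelName : String), Dom_sepDataAndLabel features labelName → Pre_sepDataAndLabel features labelName → Spec_sepDataAndLabel features labelName (sepDataAndLabel features labelName)

-- ===== LEMMAS AND PROOFS =====

-- dict(features) on distinct keys keeps the items list as given
theorem ofList_items_of_nodup (l : List (String × Int)) (h : (l.map Prod.fst).Nodup) :
    (PySem.Dict.ofList l).items = l := by
  have := PySem.Dict.items_foldl_insert_fresh (d := (PySem.Dict.empty : PySem.Dict String Int))
      (l := l) (k := Prod.fst) (v := Prod.snd)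
      (by intro a _; exact PySem.Dict.contains_empty _) h
  simpa [PySem.Dict.ofList, PySem.Dict.update, PySem.Dict.empty] using this

-- the filter of an association list with distinct keys at one key is determined by find?
theorem filter_key_eq_find (s : String) :
    ∀ (l : List (String × Int)), (l.map Prod.fst).Nodup →
      l.filter (fun p => p.1 == s) =
        (match l.find? (fun p => p.1 == s) with
         | some pv => [(s, pv.2)]
         | none => []) := by
  intro l
  induction l with
  | nil => intro _; simp
  | cons hd tl ih =>
    intro hnd
    simp only [List.map_cons, List.nodup_cons] at hnd
    by_cases hk : hd.1 = s
    · subst hk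
      have htl : tl.filter (fun p => p.1 == hd.1) = [] := by
        rw [List.filter_eq_nil_iff]
        intro p hp hbeq
        exact hnd.1 (List.mem_map.mpr ⟨p, hp, eq_of_beq hbeq⟩)
      simp [List.find?, htl]
    · have hb : (hd.1 == s) = false := by simpa using hk
      simp only [List.filter_cons, hb, Bool.false_eq_true, if_false, List.find?]
      exact ih hnd.2

-- A's loop: with fresh distinct keys and correct lookups it appends the two filters
theorem loopA (lab : String) (d : PySem.Dict String Int) :
    ∀ (l : List (String × Int)) (da la : PySem.Dict String Int),
      (∀ p ∈ l, d.getD p.1 0 = p.2) →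
      (l.map Prod.fst).Nodup →
      (∀ p ∈ l, da.contains p.1 = false) →
      (∀ p ∈ l, la.contains p.1 = false) →
      l.foldl
        (fun (acc : PySem.Dict String Int × PySem.Dict String Int) p =>
          if p.1 ≠ lab then (acc.1.insert p.1 (d.getD p.1 0), acc.2)
          else (acc.1, acc.2.insert p.1 (d.getD p.1 0)))
        (da, la)
      = (PySem.Dict.mk (da.items ++ l.filter (fun p => p.1 != lab)),
         PySem.Dict.mk (la.items ++ l.filter (fun p => p.1 == lab))) := by
  intro l
  induction l with
  | nil => intro da la _ _ _ _; simp
  | cons hd tl ih =>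
    intro da la hval hnd hda hla
    simp only [List.map_cons, List.nodup_cons] at hnd
    have hvhd : d.getD hd.1 0 = hd.2 := hval hd (List.mem_cons_self ..)
    have hfresh' : ∀ p ∈ tl, (p.1 == hd.1) = false := by
      intro p hp
      refine beq_eq_false_iff_ne.mpr ?_
      intro h
      exact hnd.1 (List.mem_map.mpr ⟨p, hp, h⟩)
    by_cases hc : hd.1 = lab
    · -- label branch
      have hb : (hd.1 == lab) = true := by simpa using hc
      have hbne : (hd.1 != lab) = false := by simp [bne, hb]
      simp only [List.foldl_cons, hc, ne_eq, not_true_eq_false, if_false]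
      rw [ih da (la.insert lab (d.getD lab 0))
            (fun p hp => hval p (List.mem_cons_of_mem _ hp)) hnd.2
            (fun p hp => hda p (List.mem_cons_of_mem _ hp))
            (fun p hp => by
              rw [PySem.Dict.contains_insert]
              simp [hc ▸ hfresh' p hp, hla p (List.mem_cons_of_mem _ hp)])]
      have hv2 : d.getD lab 0 = hd.2 := hc ▸ hvhd
      have hnc : la.contains lab = false := hc ▸ hla hd (List.mem_cons_self ..)
      have hli : (la.insert lab (d.getD lab 0)).items = la.items ++ [(hd.1, hd.2)] := by
        rw [PySem.Dict.items_insert_of_not_contains la (d.getD lab 0) hnc, hv2, hc]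
      rw [hli]
      have hpair : hd = (hd.1, hd.2) := rfl
      simp [hb, hbne, List.append_assoc, ← hpair]
    · -- data branch
      have hb : (hd.1 == lab) = false := by simpa using hc
      have hbne : (hd.1 != lab) = true := by simp [bne, hb]
      simp only [List.foldl_cons, hc, ne_eq, not_false_eq_true, if_true]
      rw [ih (da.insert hd.1 (d.getD hd.1 0)) la
            (fun p hp => hval p (List.mem_cons_of_mem _ hp)) hnd.2
            (fun p hp => by
              rw [PySem.Dict.contains_insert]
              simp [hfresh' p hp, hda p (List.mem_cons_of_mem _ hp)])
            (fun p hp => hla p (List.mem_cons_of_mem _ hp))]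
      have hdi : (da.insert hd.1 (d.getD hd.1 0)).items = da.items ++ [(hd.1, hd.2)] := by
        rw [PySem.Dict.items_insert_of_not_contains da (d.getD hd.1 0) (hda hd (List.mem_cons_self ..)), hvhd]
      rw [hdi]
      have hpair : hd = (hd.1, hd.2) := rfl
      simp [hb, hbne, List.append_assoc, ← hpair]

-- ===== VERDICT (by name: the statement is the Claim_ definition above) =====
theorem sepDataAndLabel_spec : Claim_equal_sepDataAndLabel := by
  intro features labelName _ hpre
  unfold Spec_sepDataAndLabel sepDataAndLabel sepDataAndLabel_alt
  simp only []
  have hitems : (PySem.Dict.ofList features).items = features := ofList_items_of_nodup features hpre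
  have hkeys : (PySem.Dict.ofList features).keys.Nodup := by
    simpa [PySem.Dict.keys, hitems] using hpre
  have hval : ∀ p ∈ features, (PySem.Dict.ofList features).getD p.1 0 = p.2 := by
    intro p hp
    exact PySem.Dict.getD_of_mem_items _ (by rw [hitems]; exact (by simpa using hp)) hkeys 0
  rw [loopA labelName (PySem.Dict.ofList features) features
        PySem.Dict.empty PySem.Dict.empty hval hpre
        (fun p _ => PySem.Dict.contains_empty _)
        (fun p _ => PySem.Dict.contains_empty _)]
  simp only [PySem.Dict.pop?, PySem.Dict.get?, hitems, PySem.Dict.empty]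
  rw [filter_key_eq_find labelName features hpre]
  cases hfind : features.find? (fun p => p.1 == labelName) with
  | none =>
    have hall : ∀ p ∈ features, (p.1 == labelName) = false :=
      fun p hp => by simpa using List.find?_eq_none.mp hfind p hp
    have hfe : features.filter (fun p => p.1 != labelName) = features :=
      List.filter_eq_self.mpr (fun p hp => by simp [bne, hall p hp])
    simp [hfe]
  | some pv =>
    have herase : (PySem.Dict.erase (PySem.Dict.ofList features) labelName).items
        = features.filter (fun p => p.1 != labelName) := by
      simp [PySem.Dict.erase, hitems, bne]
    simp [herase]
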